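-- pv_equiv track=rewrite | github.com/hrsidkpi/AbstractNN | utils/math_util.py | vertices_from_bounds
-- ===== SOURCE A (Python) =====
-- def vertices_from_bounds(bounds):
--     if len(bounds) == 0:
--         return []
--     curr_bound = bounds[0]
--     next_vertices = vertices_from_bounds(bounds[1:])
--     if len(next_vertices) != 0:
--         vertices_lower = [[curr_bound[0]] + v for v in next_vertices]
--         vertices_upper = [[curr_bound[1]] + v for v in next_vertices]
--     else:
--         vertices_lower = [[curr_bound[0]]]
--         vertices_upper = [[curr_bound[1]]]
--     return vertices_lower + vertices_upper
-- ===== SOURCE B (Python) =====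
-- def vertices_from_bounds(bounds):
--     if not bounds:
--         return []
--     n = len(bounds)
--     return [[bounds[i][(k >> (n - 1 - i)) & 1] for i in range(n)]
--             for k in range(1 << n)]
-- ===== Notes on version B (the rewrite author's own statement) =====
-- stated objective: alternative
-- what changed: Replaces A's recursion on the first dimension by a closed-form bitmask enumeration: vertex k picks bounds[i][bit i of k], with the first coordinate as the most significant bit, reproducing A's order.
import Mathlib
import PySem

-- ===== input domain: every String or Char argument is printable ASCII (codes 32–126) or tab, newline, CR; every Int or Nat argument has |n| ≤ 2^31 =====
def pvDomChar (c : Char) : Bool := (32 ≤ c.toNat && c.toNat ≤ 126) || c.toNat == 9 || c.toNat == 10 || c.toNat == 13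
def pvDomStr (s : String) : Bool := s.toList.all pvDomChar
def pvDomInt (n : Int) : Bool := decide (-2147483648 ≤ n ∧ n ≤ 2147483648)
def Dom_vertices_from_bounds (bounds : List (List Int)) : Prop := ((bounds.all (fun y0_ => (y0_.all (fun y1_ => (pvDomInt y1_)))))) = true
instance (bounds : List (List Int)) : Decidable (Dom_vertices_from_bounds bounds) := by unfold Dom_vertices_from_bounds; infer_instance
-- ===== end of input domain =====

-- B replaces A's recursion by a closed-form bitmask enumeration (vertex k picks bounds[i][bit i of k]); alternative, same cost.

-- ===== PORT A =====
-- recursive transliteration of A; curr_bound[0]/[1] via pyGet? (Pre_ guarantees the index is in range, so getD 0 is never taken)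
def vertices_from_bounds (bounds : List (List Int)) : List (List Int) :=
  match bounds with
  | [] => []
  | curr_bound :: rest =>
    let next_vertices := vertices_from_bounds rest
    let lo := (PySem.List.pyGet? curr_bound 0).getD 0
    let hi := (PySem.List.pyGet? curr_bound 1).getD 0
    if next_vertices.length ≠ 0 then
      (next_vertices.map (fun v => lo :: v)) ++ (next_vertices.map (fun v => hi :: v))
    else
      [[lo]] ++ [[hi]]

-- ===== PORT B =====
-- Source B's inner comprehension: vertex number k, bit (n-1-i) of k selects bounds[i][0] or bounds[i][1]
def pvRow (bounds : List (List Int)) (n k : Nat) : List Int :=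
  (List.range n).map (fun i =>
    let b := bounds.getD i []
    (PySem.List.pyGet? b (if (k >>> (n - 1 - i)) % 2 = 1 then 1 else 0)).getD 0)

-- bitmask enumeration, as in Source B: one row per k in range(2^n)
def vertices_from_bounds_alt (bounds : List (List Int)) : List (List Int) :=
  if bounds = [] then []
  else (List.range (2 ^ bounds.length)).map (pvRow bounds bounds.length)

-- ===== PRECONDITION & SPEC =====
-- Pre_ excludes exactly the inputs where A raises IndexError: some bound list with fewer than 2 entries.
def Pre_vertices_from_bounds (bounds : List (List Int)) : Prop :=
  ∀ b ∈ bounds, 2 ≤ b.length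
instance (bounds : List (List Int)) : Decidable (Pre_vertices_from_bounds bounds) := by unfold Pre_vertices_from_bounds; infer_instance
def pvWitness_vertices_from_bounds : List (List Int) := [[0, 1], [2, 3]]

def Spec_vertices_from_bounds (bounds : List (List Int)) (out : List (List Int)) : Prop := out = vertices_from_bounds_alt bounds
instance (bounds : List (List Int)) (out : List (List Int)) : Decidable (Spec_vertices_from_bounds bounds out) := by unfold Spec_vertices_from_bounds; infer_instance

-- ===== CLAIM (what is proved, stated in full; the proofs are below) =====
def Claim_equal_vertices_from_bounds : Prop := ∀ (bounds : List (List Int)), Dom_vertices_from_bounds bounds → Pre_vertices_from_bounds bounds → Spec_vertices_from_bounds bounds (vertices_from_bounds bounds)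

-- ===== LEMMAS AND PROOFS =====

-- low half of the enumeration: top bit 0, so row k (k < 2^m) is lo :: row of the tail
lemma pvRow_low (cb : List Int) (rest : List (List Int)) (k : Nat)
    (hk : k < 2 ^ rest.length) :
    pvRow (cb :: rest) (rest.length + 1) k =
      ((PySem.List.pyGet? cb 0).getD 0) :: pvRow rest rest.length k := by
  unfold pvRow
  rw [List.range_succ_eq_map]
  simp only [List.map_cons, List.map_map]
  congr 1
  · have : k >>> rest.length = 0 := by
      rw [Nat.shiftRight_eq_div_pow]
      exact Nat.div_eq_of_lt hk
    simp [this]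
  · apply List.map_congr_left
    intro j hj
    simp only [Function.comp, List.getD_cons_succ]
    have hshift : rest.length + 1 - 1 - (j + 1) = rest.length - 1 - j := by omega
    rw [hshift]

-- high half: top bit 1, lower bits unchanged, so row (2^m + k) is hi :: row of the tail
lemma pvRow_high (cb : List Int) (rest : List (List Int)) (k : Nat)
    (hk : k < 2 ^ rest.length) :
    pvRow (cb :: rest) (rest.length + 1) (2 ^ rest.length + k) =
      ((PySem.List.pyGet? cb 1).getD 0) :: pvRow rest rest.length k := by
  unfold pvRow
  rw [List.range_succ_eq_map]
  simp only [List.map_cons, List.map_map]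
  congr 1
  · have : (2 ^ rest.length + k) >>> rest.length = 1 := by
      rw [Nat.shiftRight_eq_div_pow, Nat.add_comm, Nat.add_div_right _ (Nat.two_pow_pos _) ]
      rw [Nat.div_eq_of_lt hk]
    simp [this]
  · apply List.map_congr_left
    intro j hj
    simp only [Function.comp, List.getD_cons_succ]
    have hjlt : j < rest.length := List.mem_range.mp hj
    have hshift : rest.length + 1 - 1 - (j + 1) = rest.length - 1 - j := by omega
    rw [hshift]
    congr 2
    set s := rest.length - 1 - j with hs
    have hsm : s < rest.length := by omega
    have h2 : 2 ^ rest.length = 2 ^ (rest.length - s) * 2 ^ s := by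
      rw [← pow_add]; congr 1; omega
    rw [Nat.shiftRight_eq_div_pow, Nat.shiftRight_eq_div_pow, Nat.add_comm, h2,
      Nat.add_mul_div_right _ _ (Nat.two_pow_pos _)]
    have heven : 2 ^ (rest.length - s) % 2 = 0 := by
      obtain ⟨t, ht⟩ := Nat.exists_eq_succ_of_ne_zero (show rest.length - s ≠ 0 by omega)
      rw [ht, pow_succ, Nat.mul_mod_left]
    omega

lemma vertices_eq_rows (bounds : List (List Int)) (hne : bounds ≠ []) :
    vertices_from_bounds bounds =
      (List.range (2 ^ bounds.length)).map (pvRow bounds bounds.length) := by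
  induction bounds with
  | nil => exact absurd rfl hne
  | cons cb rest ih =>
    cases rest with
    | nil =>
      show vertices_from_bounds [cb] = _
      simp [vertices_from_bounds, pvRow, List.range_succ]
    | cons r rs =>
      have hr : (r :: rs : List (List Int)) ≠ [] := by simp
      have ihr := ih hr
      set m := (r :: rs).length with hm
      have hlen : (vertices_from_bounds (r :: rs)).length ≠ 0 := by
        rw [ihr]
        simp only [List.length_map, List.length_range]
        exact (Nat.two_pow_pos m).ne'
      show vertices_from_bounds (cb :: r :: rs) = _
      rw [show vertices_from_bounds (cb :: r :: rs) =
          (if (vertices_from_bounds (r :: rs)).length ≠ 0 then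
            ((vertices_from_bounds (r :: rs)).map (fun v => ((PySem.List.pyGet? cb 0).getD 0) :: v)) ++
            ((vertices_from_bounds (r :: rs)).map (fun v => ((PySem.List.pyGet? cb 1).getD 0) :: v))
          else [[((PySem.List.pyGet? cb 0).getD 0)], [((PySem.List.pyGet? cb 1).getD 0)]]) from rfl,
        if_pos hlen, ihr]
      have hlen2 : (cb :: r :: rs).length = m + 1 := rfl
      rw [hlen2, pow_succ]
      rw [show 2 ^ m * 2 = 2 ^ m + 2 ^ m by ring, List.range_add, List.map_append]
      congr 1
      · rw [List.map_map]
        apply List.map_congr_left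
        intro k hk
        exact (pvRow_low cb (r :: rs) k (List.mem_range.mp hk)).symm
      · rw [List.map_map, List.map_map]
        apply List.map_congr_left
        intro k hk
        exact (pvRow_high cb (r :: rs) k (List.mem_range.mp hk)).symm

-- ===== VERDICT (by name: the statement is the Claim_ definition above) =====
theorem vertices_from_bounds_spec : Claim_equal_vertices_from_bounds := by
  intro bounds _ _
  unfold Spec_vertices_from_bounds vertices_from_bounds_alt
  split_ifs with h
  · subst h; rfl
  · exact vertices_eq_rows bounds h
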